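-- pv_equiv track=rewrite | github.com/esraayantuna/Data-Analysis-with-Python | assignmentVIq1.py | insert_blanks
-- ===== SOURCE A (Python) =====
-- def insert_blanks(s):
--     result = ''
--     for i in range(0, len(s)):
--         if s[i] == '(' or s[i] == ')' \
--                 or s[i] == '[' or s[i] == ']' \
--                 or s[i] == '{' or s[i] == '}':
--             result += ' ' + s [i] + ' '
--         else:
--             result += s[i]
--
--     return result
-- ===== SOURCE B (Python) =====
-- def insert_blanks(s):
--     for c in '()[]{}':
--         s = s.replace(c, ' ' + c + ' ')
--     return s
-- ===== Notes on version B (the rewrite author's own statement) =====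
-- stated objective: idiomatic
-- what changed: Replaces A's single per-character loop with its six-way if/else and string accumulation by six staged whole-string str.replace passes, one per bracket character; correct because each pass inserts only spaces and its own bracket, which no later pass touches.
import Mathlib
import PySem

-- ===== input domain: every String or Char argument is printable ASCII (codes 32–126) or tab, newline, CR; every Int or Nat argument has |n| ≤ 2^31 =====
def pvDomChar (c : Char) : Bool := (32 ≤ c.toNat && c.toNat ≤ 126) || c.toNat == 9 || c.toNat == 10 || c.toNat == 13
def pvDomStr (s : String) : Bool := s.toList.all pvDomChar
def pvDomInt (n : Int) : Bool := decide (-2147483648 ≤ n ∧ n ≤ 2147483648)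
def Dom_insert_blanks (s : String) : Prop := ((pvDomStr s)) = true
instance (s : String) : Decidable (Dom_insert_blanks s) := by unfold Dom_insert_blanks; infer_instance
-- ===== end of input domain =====

-- B replaces A's single per-character loop (six-way if/else, string accumulator) by six staged
-- whole-string replace passes, one per bracket character (idiomatic; same result).


-- ===== PORT A =====
-- A: loop over the characters, appending ' c ' for each bracket and c otherwise, in A's branch order.
def insert_blanks (s : String) : String :=
  s.toList.foldl (fun result c =>
    if c = '(' || c = ')' || c = '[' || c = ']' || c = '{' || c = '}' then
      result ++ (" " ++ String.singleton c ++ " ")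
    else
      result ++ String.singleton c) ""

-- ===== PORT B =====
-- B: for c in '()[]{}': s = s.replace(c, ' ' + c + ' '); return s — six staged replace passes.
def insert_blanks_alt (s : String) : String :=
  "()[]{}".toList.foldl
    (fun t c => PySem.Str.replace t (String.singleton c) (" " ++ String.singleton c ++ " ")) s

-- ===== PRECONDITION & SPEC =====
def Spec_insert_blanks (s : String) (out : String) : Prop := out = insert_blanks_alt s
instance (s : String) (out : String) : Decidable (Spec_insert_blanks s out) := by
  unfold Spec_insert_blanks; infer_instance

-- ===== CLAIM =====
def Claim_equal_insert_blanks : Prop :=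
  ∀ (s : String), Dom_insert_blanks s → Spec_insert_blanks s (insert_blanks s)

-- ===== LEMMAS AND PROOFS =====
-- The per-character substitution a single-bracket pass performs.
def pvF (b x : Char) : List Char := if x = b then [' ', b, ' '] else [x]

-- The combined effect of all six passes: B's net per-character table.
def pvTable (c : Char) : List Char :=
  if c = '(' ∨ c = ')' ∨ c = '[' ∨ c = ']' ∨ c = '{' ∨ c = '}' then [' ', c, ' '] else [c]

-- Chars.replace.go with a single-character pattern is a flatMap of the per-character substitution.
theorem replace_go_single (b : Char) (pad : List Char) (l : List Char) :
    ∀ (fuel : Nat) (acc : List Char), l.length ≤ fuel →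
      PySem.Chars.replace.go [b] pad fuel l acc =
        acc.reverse ++ l.flatMap (fun x => if x = b then pad else [x]) := by
  induction l with
  | nil =>
    intro fuel acc _
    cases fuel <;> simp [PySem.Chars.replace.go]
  | cons c t ih =>
    intro fuel acc hf
    cases fuel with
    | zero => simp at hf
    | succ n =>
      simp only [List.length_cons, Nat.succ_le_succ_iff] at hf
      by_cases h : c = b
      · subst h
        have hp : List.isPrefixOf [c] (c :: t) = true := by simp [List.isPrefixOf]
        simp [PySem.Chars.replace.go, hp, ih n _ hf]
      · have hp : List.isPrefixOf [b] (c :: t) = false := by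
          simp [List.isPrefixOf]; exact fun hbc => absurd hbc.symm h
        simp [PySem.Chars.replace.go, hp, ih n _ hf, h]

-- str.replace with a single-character pattern, at the character-list level.
theorem replace_single (b : Char) (pad s : String) :
    (PySem.Str.replace s (String.singleton b) pad).toList =
      s.toList.flatMap (fun x => if x = b then pad.toList else [x]) := by
  rw [PySem.Str.toList_replace]
  have : (String.singleton b).toList = [b] := by simp [String.singleton]
  rw [this]
  unfold PySem.Chars.replace
  simp only [List.isEmpty_cons, if_neg Bool.false_ne_true]
  exact replace_go_single b pad.toList s.toList s.toList.length [] le_rfl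

-- Composing the six per-bracket substitutions on one character gives the net table.
theorem chain_char (x : Char) :
    ((((((pvF '(' x).flatMap (pvF ')')).flatMap (pvF '[')).flatMap (pvF ']')).flatMap
        (pvF '{')).flatMap (pvF '}')) = pvTable x := by
  by_cases h1 : x = '(' ; · subst h1; simp [pvF, pvTable]
  by_cases h2 : x = ')' ; · subst h2; simp [pvF, pvTable]
  by_cases h3 : x = '[' ; · subst h3; simp [pvF, pvTable]
  by_cases h4 : x = ']' ; · subst h4; simp [pvF, pvTable]
  by_cases h5 : x = '{' ; · subst h5; simp [pvF, pvTable]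
  by_cases h6 : x = '}' ; · subst h6; simp [pvF, pvTable]
  simp [pvF, pvTable, h1, h2, h3, h4, h5, h6]

-- The six staged passes, chained on a whole list, equal one flatMap of the net table.
theorem chain_list (l : List Char) :
    ((((((l.flatMap (pvF '(')).flatMap (pvF ')')).flatMap (pvF '[')).flatMap (pvF ']')).flatMap
        (pvF '{')).flatMap (pvF '}')) = l.flatMap pvTable := by
  induction l with
  | nil => simp
  | cons c t ih => simp only [List.flatMap_cons, List.flatMap_append, ih, chain_char]

-- B, at the character-list level, is the flatMap of the net table.
theorem alt_toList (s : String) : (insert_blanks_alt s).toList = s.toList.flatMap pvTable := by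
  unfold insert_blanks_alt
  rw [show "()[]{}".toList = ['(', ')', '[', ']', '{', '}'] from by decide]
  simp only [List.foldl_cons, List.foldl_nil]
  have hfun : ∀ b : Char,
      (fun x => if x = b then (" " ++ String.singleton b ++ " ").toList else [x]) = pvF b := by
    intro b; funext x; simp [pvF, String.singleton]
  rw [replace_single, replace_single, replace_single, replace_single, replace_single,
    replace_single]
  simp only [hfun]
  exact chain_list s.toList

-- One step of A's loop appends exactly the net table entry for that character.
theorem step_toList (r : String) (c : Char) :
    (if c = '(' || c = ')' || c = '[' || c = ']' || c = '{' || c = '}' then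
        r ++ (" " ++ String.singleton c ++ " ")
      else r ++ String.singleton c).toList = r.toList ++ pvTable c := by
  unfold pvTable
  by_cases h : c = '(' ∨ c = ')' ∨ c = '[' ∨ c = ']' ∨ c = '{' ∨ c = '}'
  · have hb : (c = '(' || c = ')' || c = '[' || c = ']' || c = '{' || c = '}') = true := by
      rcases h with h|h|h|h|h|h <;> simp [h]
    simp [hb, h, String.singleton]
  · push Not at h
    have hb : (c = '(' || c = ')' || c = '[' || c = ']' || c = '{' || c = '}') = false := by
      simp [h.1, h.2.1, h.2.2.1, h.2.2.2.1, h.2.2.2.2.1, h.2.2.2.2.2]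
    have h' : ¬ (c = '(' ∨ c = ')' ∨ c = '[' ∨ c = ']' ∨ c = '{' ∨ c = '}') := by
      simp [h.1, h.2.1, h.2.2.1, h.2.2.2.1, h.2.2.2.2.1, h.2.2.2.2.2]
    simp [hb, h', String.singleton]

-- A's whole loop, at the character-list level, is acc ++ (flatMap of the net table).
theorem insert_blanks_foldl (l : List Char) (acc : String) :
    (l.foldl (fun result c =>
      if c = '(' || c = ')' || c = '[' || c = ']' || c = '{' || c = '}' then
        result ++ (" " ++ String.singleton c ++ " ")
      else
        result ++ String.singleton c) acc).toList = acc.toList ++ l.flatMap pvTable := by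
  induction l generalizing acc with
  | nil => simp
  | cons c t ih =>
    rw [List.foldl_cons, List.flatMap_cons, ih, step_toList, List.append_assoc]

-- ===== VERDICT =====
theorem insert_blanks_spec : Claim_equal_insert_blanks := by
  intro s _
  unfold Spec_insert_blanks
  apply String.toList_inj.mp
  rw [alt_toList]
  unfold insert_blanks
  rw [insert_blanks_foldl]
  simp
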